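-- pv_equiv track=rewrite | github.com/krishnagoyal099/Opengrid_env | src/tasks.py | _classify_lines
-- ===== SOURCE A (Python) =====
-- from typing import Dict, List, Tuple
--
-- def _classify_lines(
--     lines_config: List[Dict], zone_assignments: Dict[int, int]
-- ) -> Tuple[Dict[int, List[str]], Dict[int, List[str]]]:
--     """Classify lines as internal (both endpoints in same zone) or boundary.
--
--     Returns:
--         internal_lines: {agent_id: [line_ids within this zone]}
--         boundary_lines: {agent_id: [line_ids on this zone's boundary]}
--     """
--     agents = set(zone_assignments.values())
--     internal = {a: [] for a in agents}
--     boundary = {a: [] for a in agents}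
--
--     for line in lines_config:
--         from_zone = zone_assignments.get(line['from'])
--         to_zone = zone_assignments.get(line['to'])
--
--         # Skip lines with unassigned bus endpoints
--         if from_zone is None or to_zone is None:
--             continue
--
--         if from_zone == to_zone:
--             internal[from_zone].append(line['id'])
--         else:
--             boundary[from_zone].append(line['id'])
--             boundary[to_zone].append(line['id'])
--
--     return internal, boundary
-- ===== SOURCE B (Python) =====
-- def _classify_lines(lines_config, zone_assignments):
--     # Alternative decomposition: resolve each line's endpoint zones once into a
--     # list of (from_zone, to_zone, id) triples, then build every zone's lists
--     # with per-agent filtering comprehensions instead of one distribution pass.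
--     resolved = []
--     for line in lines_config:
--         fz = zone_assignments.get(line['from'])
--         tz = zone_assignments.get(line['to'])
--         if fz is not None and tz is not None:
--             resolved.append((fz, tz, line['id']))
--     agents = dict.fromkeys(zone_assignments.values())
--     internal = {a: [i for fz, tz, i in resolved if fz == a and tz == a]
--                 for a in agents}
--     boundary = {a: [i for fz, tz, i in resolved if fz != tz and a in (fz, tz)]
--                 for a in agents}
--     return internal, boundary
-- ===== Notes on version B (the rewrite author's own statement) =====
-- stated objective: alternative
-- what changed: Replaces A's single distribution pass (appending each line's id into per-zone dict lists as it scans) by a resolve-once pass producing (from_zone, to_zone, id) triples followed by per-agent filtering comprehensions that build each zone's internal/boundary lists independently.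
import Mathlib
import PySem

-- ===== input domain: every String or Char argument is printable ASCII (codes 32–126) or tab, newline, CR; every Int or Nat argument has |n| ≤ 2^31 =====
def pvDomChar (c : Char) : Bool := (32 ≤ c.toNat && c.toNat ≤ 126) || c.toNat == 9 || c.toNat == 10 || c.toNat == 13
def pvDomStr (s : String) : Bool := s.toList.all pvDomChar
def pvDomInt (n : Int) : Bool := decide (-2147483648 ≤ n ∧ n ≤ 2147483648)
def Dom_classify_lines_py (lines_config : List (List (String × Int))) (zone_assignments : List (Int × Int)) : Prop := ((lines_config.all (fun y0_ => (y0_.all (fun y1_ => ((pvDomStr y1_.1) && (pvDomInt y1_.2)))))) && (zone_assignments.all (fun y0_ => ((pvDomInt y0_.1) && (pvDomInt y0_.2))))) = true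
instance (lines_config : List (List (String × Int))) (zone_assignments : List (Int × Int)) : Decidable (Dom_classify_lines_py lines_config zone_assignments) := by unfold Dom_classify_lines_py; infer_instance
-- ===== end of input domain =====

-- B replaces A's single distribution pass by a resolve-once pass plus per-agent filtering
-- comprehensions (an alternative decomposition of the same classification).


-- ===== PORT A =====
-- A's loop body (the per-line distribution step); `modify` with default [] is exact here
-- because the touched zone keys always exist in both dicts (they are values of zone_assignments).
def pvStepA (za : PySem.Dict Int Int)
    (st : PySem.Dict Int (List Int) × PySem.Dict Int (List Int)) (line : List (String × Int)) :
    PySem.Dict Int (List Int) × PySem.Dict Int (List Int) :=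
  let ld : PySem.Dict String Int := PySem.Dict.mk line
  match ld.get? "from", ld.get? "to" with
  | some f, some t =>
    match za.get? f, za.get? t with
    | some fz, some tz =>
      match ld.get? "id" with
      | some i =>
        if fz == tz then (st.1.modify fz [] (· ++ [i]), st.2)
        else (st.1, (st.2.modify fz [] (· ++ [i])).modify tz [] (· ++ [i]))
      | none => st      -- line['id'] raises KeyError in Python: excluded by Pre_
    | _, _ => st        -- unassigned endpoint: `continue`
  | _, _ => st          -- line['from'] / line['to'] raises KeyError: excluded by Pre_

def classify_lines_py (lines_config : List (List (String × Int))) (zone_assignments : List (Int × Int)) : (List (Int × List Int)) × (List (Int × List Int)) :=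
  let za : PySem.Dict Int Int := PySem.Dict.mk zone_assignments
  let agents : List Int := PySem.Set.ofList (PySem.Dict.values za)
  let internal : PySem.Dict Int (List Int) := PySem.Dict.mk (agents.map (fun a => (a, ([] : List Int))))
  let boundary : PySem.Dict Int (List Int) := PySem.Dict.mk (agents.map (fun a => (a, ([] : List Int))))
  let r := lines_config.foldl (pvStepA za) (internal, boundary)
  (r.1.items, r.2.items)

-- ===== PORT B =====
-- B's first pass: (from_zone, to_zone, id) for every line whose endpoints are both assigned.
def pvResolve (za : PySem.Dict Int Int) (lines_config : List (List (String × Int))) : List (Int × Int × Int) :=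
  lines_config.filterMap (fun line =>
    let ld : PySem.Dict String Int := PySem.Dict.mk line
    match ld.get? "from", ld.get? "to" with
    | some f, some t =>
      match za.get? f, za.get? t with
      | some fz, some tz => (ld.get? "id").map (fun i => (fz, tz, i))   -- line['id'] KeyError excluded by Pre_
      | _, _ => none
    | _, _ => none)     -- line['from'] / line['to'] KeyError excluded by Pre_

def classify_lines_py_alt (lines_config : List (List (String × Int))) (zone_assignments : List (Int × Int)) : (List (Int × List Int)) × (List (Int × List Int)) :=
  let za : PySem.Dict Int Int := PySem.Dict.mk zone_assignments
  let resolved := pvResolve za lines_config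
  let agents : List Int := PySem.Set.ofList (PySem.Dict.values za)
  (agents.map (fun a => (a, (resolved.filter (fun r => r.1 == a && r.2.1 == a)).map (·.2.2))),
   agents.map (fun a => (a, (resolved.filter (fun r => r.1 != r.2.1 && (r.1 == a || r.2.1 == a))).map (·.2.2))))

-- ===== PRECONDITION & SPEC =====
-- Pre_ excludes exactly the inputs where Python A raises KeyError: a line missing the
-- 'from' or 'to' key, or a line with both endpoints assigned to zones but no 'id' key.
def Pre_classify_lines_py (lines_config : List (List (String × Int))) (zone_assignments : List (Int × Int)) : Prop :=
  ∀ line ∈ lines_config,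
    ((PySem.Dict.mk line).get? "from").isSome ∧ ((PySem.Dict.mk line).get? "to").isSome ∧
    ((((PySem.Dict.mk line).get? "from").bind (PySem.Dict.mk zone_assignments).get?).isSome →
      (((PySem.Dict.mk line).get? "to").bind (PySem.Dict.mk zone_assignments).get?).isSome →
      ((PySem.Dict.mk line).get? "id").isSome)
instance (lines_config : List (List (String × Int))) (zone_assignments : List (Int × Int)) : Decidable (Pre_classify_lines_py lines_config zone_assignments) := by unfold Pre_classify_lines_py; infer_instance

def pvWitness_classify_lines_py : (List (List (String × Int))) × (List (Int × Int)) :=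
  ([[("from", 1), ("to", 2), ("id", 0)], [("from", 1), ("to", 1), ("id", 1)], [("from", 9), ("to", 1)]],
   [(1, 10), (2, 20)])

def Spec_classify_lines_py (lines_config : List (List (String × Int))) (zone_assignments : List (Int × Int)) (out : (List (Int × List Int)) × (List (Int × List Int))) : Prop := out = classify_lines_py_alt lines_config zone_assignments
instance (lines_config : List (List (String × Int))) (zone_assignments : List (Int × Int)) (out : (List (Int × List Int)) × (List (Int × List Int))) : Decidable (Spec_classify_lines_py lines_config zone_assignments out) := by unfold Spec_classify_lines_py; infer_instance

-- ===== CLAIM (what is proved, stated in full; the proofs are below) =====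
def Claim_equal_classify_lines_py : Prop := ∀ (lines_config : List (List (String × Int))) (zone_assignments : List (Int × Int)), Dom_classify_lines_py lines_config zone_assignments → Pre_classify_lines_py lines_config zone_assignments → Spec_classify_lines_py lines_config zone_assignments (classify_lines_py lines_config zone_assignments)

-- ===== LEMMAS AND PROOFS =====

-- `modify z [] u` on a dict of shape `mk (agents.map fun a => (a, f a))` with z ∈ agents
-- rewrites just z's entry, in place.
theorem pvModify_mk_map (agents : List Int) (hnd : agents.Nodup) (f : Int → List Int)
    (z : Int) (hz : z ∈ agents) (u : List Int → List Int) :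
    (PySem.Dict.mk (agents.map fun a => (a, f a))).modify z [] u
      = PySem.Dict.mk (agents.map fun a => (a, if a = z then u (f a) else f a)) := by
  have hm : (z, f z) ∈ (PySem.Dict.mk (agents.map fun a => (a, f a))).items :=
    List.mem_map.mpr ⟨z, hz, rfl⟩
  have hk : (PySem.Dict.mk (agents.map fun a => (a, f a))).keys.Nodup := by
    simpa [PySem.Dict.keys_mk, List.map_map, Function.comp_def] using hnd
  have hg : (PySem.Dict.mk (agents.map fun a => (a, f a))).getD z [] = f z :=
    PySem.Dict.getD_of_mem_items _ hm hk []
  have hc : (PySem.Dict.mk (agents.map fun a => (a, f a))).contains z = true := by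
    simp only [PySem.Dict.contains, List.any_eq_true]
    exact ⟨(z, f z), hm, by simp⟩
  have hi := PySem.Dict.items_insert_of_contains (PySem.Dict.mk (agents.map fun a => (a, f a)))
      (u ((PySem.Dict.mk (agents.map fun a => (a, f a))).getD z [])) hc
  show (PySem.Dict.mk (agents.map fun a => (a, f a))).insert z
      (u ((PySem.Dict.mk (agents.map fun a => (a, f a))).getD z [])) = _
  apply congrArg PySem.Dict.mk (Eq.trans hi ?_)
  rw [hg, List.map_map]
  apply List.map_congr_left
  intro a _
  by_cases h : a = z <;> simp [Function.comp, h]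

-- The loop invariant: starting from per-agent accumulators f, g, A's fold over the lines
-- appends exactly B's per-agent filtered id lists.
theorem pvLoop (za : PySem.Dict Int Int) (agents : List Int) (hnd : agents.Nodup)
    (hcl : ∀ f fz, za.get? f = some fz → fz ∈ agents)
    (lines : List (List (String × Int))) (f g : Int → List Int) :
    lines.foldl (pvStepA za)
      (PySem.Dict.mk (agents.map fun a => (a, f a)), PySem.Dict.mk (agents.map fun a => (a, g a)))
    = (PySem.Dict.mk (agents.map fun a =>
          (a, f a ++ ((pvResolve za lines).filter (fun r => r.1 == a && r.2.1 == a)).map (·.2.2))),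
       PySem.Dict.mk (agents.map fun a =>
          (a, g a ++ ((pvResolve za lines).filter (fun r => r.1 != r.2.1 && (r.1 == a || r.2.1 == a))).map (·.2.2)))) := by
  induction lines generalizing f g with
  | nil => simp [pvResolve]
  | cons line rest ih =>
    simp only [List.foldl_cons]
    rcases h1 : (PySem.Dict.mk line : PySem.Dict String Int).get? "from" with _ | fk
    · simp [pvStepA, pvResolve, h1] at ih ⊢; exact ih f g
    rcases h2 : (PySem.Dict.mk line : PySem.Dict String Int).get? "to" with _ | tk
    · simp [pvStepA, pvResolve, h1, h2] at ih ⊢; exact ih f g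
    rcases h3 : za.get? fk with _ | fz
    · simp [pvStepA, pvResolve, h1, h2, h3] at ih ⊢; exact ih f g
    rcases h4 : za.get? tk with _ | tz
    · simp [pvStepA, pvResolve, h1, h2, h3, h4] at ih ⊢; exact ih f g
    rcases h5 : (PySem.Dict.mk line : PySem.Dict String Int).get? "id" with _ | i
    · simp [pvStepA, pvResolve, h1, h2, h3, h4, h5] at ih ⊢; exact ih f g
    have hfz : fz ∈ agents := hcl _ _ h3
    have htz : tz ∈ agents := hcl _ _ h4
    by_cases heq : fz = tz
    · -- internal line
      subst heq
      have hstep : pvStepA za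
          (PySem.Dict.mk (agents.map fun a => (a, f a)), PySem.Dict.mk (agents.map fun a => (a, g a))) line
          = (PySem.Dict.mk (agents.map fun a => (a, if a = fz then f a ++ [i] else f a)),
             PySem.Dict.mk (agents.map fun a => (a, g a))) := by
        simp only [pvStepA, h1, h2, h3, h4, h5, BEq.rfl, if_pos]
        rw [pvModify_mk_map agents hnd f fz hfz]
      rw [hstep, ih]
      have hres : pvResolve za (line :: rest) = (fz, fz, i) :: pvResolve za rest := by
        simp [pvResolve, h1, h2, h3, h4, h5]
      rw [hres]
      refine congrArg₂ Prod.mk ?_ ?_ <;>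
        · apply congrArg PySem.Dict.mk; apply List.map_congr_left; intro a _
          by_cases h : a = fz
          · simp [List.filter_cons, h, List.append_assoc]
          · simp [List.filter_cons, h, Ne.symm h, List.append_assoc]
    · -- boundary line
      have hbe : (fz == tz) = false := by simp [heq]
      have hstep : pvStepA za
          (PySem.Dict.mk (agents.map fun a => (a, f a)), PySem.Dict.mk (agents.map fun a => (a, g a))) line
          = (PySem.Dict.mk (agents.map fun a => (a, f a)),
             PySem.Dict.mk (agents.map fun a =>
               (a, if a = tz then (if a = fz then g a ++ [i] else g a) ++ [i]
                   else if a = fz then g a ++ [i] else g a))) := by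
        simp only [pvStepA, h1, h2, h3, h4, h5, hbe, if_neg Bool.false_ne_true]
        rw [pvModify_mk_map agents hnd g fz hfz,
            pvModify_mk_map agents hnd (fun a => if a = fz then g a ++ [i] else g a) tz htz]
      rw [hstep, ih]
      have hres : pvResolve za (line :: rest) = (fz, tz, i) :: pvResolve za rest := by
        simp [pvResolve, h1, h2, h3, h4, h5]
      rw [hres]
      refine congrArg₂ Prod.mk ?_ ?_ <;>
        · apply congrArg PySem.Dict.mk; apply List.map_congr_left; intro a _
          by_cases ha : a = fz <;> by_cases hb : a = tz
          · exact absurd (ha.symm.trans hb) heq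
          · simp [List.filter_cons, ha, hb, Ne.symm hb, heq, Ne.symm heq, List.append_assoc]
          · simp [List.filter_cons, ha, Ne.symm ha, hb, heq, Ne.symm heq, List.append_assoc]
          · simp [List.filter_cons, ha, Ne.symm ha, hb, Ne.symm hb, heq, Ne.symm heq, List.append_assoc]
  
-- a looked-up zone is a value of zone_assignments, hence one of the agents
theorem pvVal_mem (za : PySem.Dict Int Int) (f fz : Int) (h : za.get? f = some fz) :
    fz ∈ (PySem.Set.ofList za.values : List Int) := by
  rw [PySem.Set.mem_ofList]
  exact List.mem_map.mpr ⟨(f, fz), PySem.Dict.mem_items_of_get?_eq_some za h, rfl⟩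

-- ===== VERDICT (by name: the statement is the Claim_ definition above) =====
theorem classify_lines_py_spec : Claim_equal_classify_lines_py := by
  intro lines_config zone_assignments _ _
  show _ = _
  unfold classify_lines_py classify_lines_py_alt
  dsimp only
  rw [pvLoop (PySem.Dict.mk zone_assignments)
        (PySem.Set.ofList (PySem.Dict.values (PySem.Dict.mk zone_assignments)))
        (PySem.Set.nodup_ofList _)
        (pvVal_mem (PySem.Dict.mk zone_assignments))
        lines_config (fun _ => []) (fun _ => [])]
  simp [PySem.Dict.items]
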